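-- pv_equiv track=rewrite | github.com/zongyi-li/stt_investigation | tensortoolbox_als/TensorToolbox/core/auxiliary.py | idxunfold
-- ===== SOURCE A (Python) =====
-- def idxunfold(dlist,idxs):
--     """ Find the index corresponding to the unfolded (flat) version of a tensor
--
--     :param list,int dlist: list of integers containing the dimensions of the tensor
--     :param list,int idxs: tensor index
--
--     :returns: index for the flatten tensor
--     """
--
--     # Check whether index out of bounds
--     import operator
--     if any(map(operator.ge,idxs,dlist)):
--         raise NameError("TensorToolbox.core.idxunfold: Index out of bounds")
--
--     n = len(dlist)
--
--     plist = [1]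
--     for i in range(n-1,0,-1):
--         plist.append( plist[-1] * dlist[i] )
--
--     ii = sum( [ p * int(idxs[i]) for i,p in enumerate(reversed(plist)) ] )
--
--     return ii
-- ===== SOURCE B (Python) =====
-- def idxunfold(dlist, idxs):
--     """ Find the index corresponding to the unfolded (flat) version of a tensor
--
--     :param list,int dlist: list of integers containing the dimensions of the tensor
--     :param list,int idxs: tensor index
--
--     :returns: index for the flatten tensor
--     """
--
--     # Check whether index out of bounds
--     import operator
--     if any(map(operator.ge, idxs, dlist)):
--         raise NameError("TensorToolbox.core.idxunfold: Index out of bounds")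
--
--     # Horner pass: no stride list is ever materialized
--     ii = 0
--     for i in range(len(dlist)):
--         ii = ii * dlist[i] + int(idxs[i])
--     return ii
-- ===== Notes on version B (the rewrite author's own statement) =====
-- stated objective: simpler
-- what changed: The stride list built by a backward loop plus an enumerate/reversed dot-product is replaced by a single Horner accumulator pass (ii = ii*dlist[i] + idxs[i]); no weight list is materialized.
-- intended difference: On empty dlist with nonempty idxs whose first entry is nonzero, A returns int(idxs[0]) (an artifact of its stride list [1] existing even for a 0-dimensional tensor) while B returns 0, the only valid flat index of a 0-dimensional tensor. — e.g. on idxunfold([], [1]): A returns 1, B returns 0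
import Mathlib
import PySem

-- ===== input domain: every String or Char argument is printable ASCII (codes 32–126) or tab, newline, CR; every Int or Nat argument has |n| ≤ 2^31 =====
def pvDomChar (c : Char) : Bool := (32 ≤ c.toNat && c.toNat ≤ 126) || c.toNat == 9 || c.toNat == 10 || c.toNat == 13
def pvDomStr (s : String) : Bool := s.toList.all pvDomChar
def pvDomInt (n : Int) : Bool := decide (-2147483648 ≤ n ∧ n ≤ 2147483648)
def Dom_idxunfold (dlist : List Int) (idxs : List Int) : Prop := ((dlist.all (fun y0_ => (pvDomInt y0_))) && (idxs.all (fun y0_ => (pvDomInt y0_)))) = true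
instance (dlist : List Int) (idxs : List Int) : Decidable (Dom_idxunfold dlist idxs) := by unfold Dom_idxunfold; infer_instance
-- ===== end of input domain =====

-- B replaces A's stride-list + enumerate/reversed dot-product by a single Horner
-- accumulator pass (simpler; same bounds-check prologue).

-- ===== PORT A =====
-- literal port: guard = any(map(operator.ge, idxs, dlist)); the raise branch is
-- outside Pre_ (value 0 there is arbitrary). plist built by appending
-- plist[-1]*dlist[i] over range(n-1,0,-1); ii = sum(p*idxs[i] over
-- enumerate(reversed(plist))). int(idxs[i]) is the identity on Int.
def idxunfold (dlist : List Int) (idxs : List Int) : Int :=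
  if (idxs.zip dlist).any (fun p => decide (p.2 ≤ p.1)) then 0
  else
    let n : Int := PySem.List.len dlist
    let plist : List Int :=
      (PySem.List.pyRange (n - 1) 0 (-1)).foldl
        (fun pl i => pl ++ [PySem.List.pyGetD pl (-1) 0 * PySem.List.pyGetD dlist i 0]) [1]
    ((PySem.List.enumerate plist.reverse).map
      (fun p => p.2 * PySem.List.pyGetD idxs p.1 0)).sum

-- ===== PORT B =====
def idxunfold_alt (dlist : List Int) (idxs : List Int) : Int :=
  if (idxs.zip dlist).any (fun p => decide (p.2 ≤ p.1)) then 0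
  else
    (PySem.List.pyRange 0 (PySem.List.len dlist) 1).foldl
      (fun ii i => ii * PySem.List.pyGetD dlist i 0 + PySem.List.pyGetD idxs i 0) 0

-- ===== PRECONDITION & SPEC =====
-- Pre_ excludes exactly the inputs where A raises: idxs shorter than dlist or
-- (dlist = [] and idxs = []) give IndexError; a zipped pair with idxs[i] >= dlist[i]
-- gives the explicit NameError.
def Pre_idxunfold (dlist : List Int) (idxs : List Int) : Prop :=
  dlist.length ≤ idxs.length ∧ (dlist = [] → idxs ≠ []) ∧ ∀ p ∈ idxs.zip dlist, p.1 < p.2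
instance (dlist : List Int) (idxs : List Int) : Decidable (Pre_idxunfold dlist idxs) := by
  unfold Pre_idxunfold; infer_instance
def pvWitness_idxunfold : List Int × List Int := ([2, 3], [1, 2])

-- On empty dlist with nonempty idxs whose first entry is nonzero, A returns int(idxs[0])
-- (an artifact of its stride list [1] existing even for a 0-dimensional tensor) while B
-- returns 0, the only valid flat index of a 0-dimensional tensor.
def D_idxunfold (dlist : List Int) (idxs : List Int) : Prop :=
  dlist = [] ∧ idxs ≠ [] ∧ idxs.headI ≠ 0
instance (dlist : List Int) (idxs : List Int) : Decidable (D_idxunfold dlist idxs) := by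
  unfold D_idxunfold; infer_instance

def Spec_idxunfold (dlist : List Int) (idxs : List Int) (out : Int) : Prop :=
  ¬ D_idxunfold dlist idxs → out = idxunfold_alt dlist idxs
instance (dlist : List Int) (idxs : List Int) (out : Int) : Decidable (Spec_idxunfold dlist idxs out) := by
  unfold Spec_idxunfold; infer_instance

def pvDiffWitness_idxunfold : List Int × List Int := ([], [1])
def pvDiffWitnessOut_idxunfold : Int × Int := (1, 0)

-- ===== CLAIM =====
def Claim_unchanged_idxunfold : Prop := ∀ (dlist : List Int) (idxs : List Int), Dom_idxunfold dlist idxs → Pre_idxunfold dlist idxs → Spec_idxunfold dlist idxs (idxunfold dlist idxs)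
def Claim_changed_idxunfold : Prop := Dom_idxunfold (pvDiffWitness_idxunfold.1) (pvDiffWitness_idxunfold.2) ∧ Pre_idxunfold (pvDiffWitness_idxunfold.1) (pvDiffWitness_idxunfold.2) ∧ D_idxunfold (pvDiffWitness_idxunfold.1) (pvDiffWitness_idxunfold.2) ∧ idxunfold (pvDiffWitness_idxunfold.1) (pvDiffWitness_idxunfold.2) = pvDiffWitnessOut_idxunfold.1 ∧ idxunfold_alt (pvDiffWitness_idxunfold.1) (pvDiffWitness_idxunfold.2) = pvDiffWitnessOut_idxunfold.2 ∧ pvDiffWitnessOut_idxunfold.1 ≠ pvDiffWitnessOut_idxunfold.2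
def Claim_exact_idxunfold : Prop := ∀ (dlist : List Int) (idxs : List Int), Dom_idxunfold dlist idxs → Pre_idxunfold dlist idxs → D_idxunfold dlist idxs → idxunfold dlist idxs ≠ idxunfold_alt dlist idxs

-- ===== LEMMAS AND PROOFS =====

-- A-loop / B-loop bodies of the guard-free branch, and the invariants that relate them
def pvPlist (dlist : List Int) : List Int :=
  (PySem.List.pyRange ((PySem.List.len dlist) - 1) 0 (-1)).foldl
    (fun pl i => pl ++ [PySem.List.pyGetD pl (-1) 0 * PySem.List.pyGetD dlist i 0]) [1]

theorem pv_scale (g : Int → Int) (js : List Int) (acc : List Int) (d : Int) (hacc : acc ≠ []) :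
    js.foldl (fun pl i => pl ++ [PySem.List.pyGetD pl (-1) 0 * g i]) (1 :: acc.map (d * ·))
      = 1 :: (js.foldl (fun pl i => pl ++ [PySem.List.pyGetD pl (-1) 0 * g i]) acc).map (d * ·) := by
  induction js generalizing acc with
  | nil => rfl
  | cons j js ih =>
    simp only [List.foldl_cons]
    have h1 : PySem.List.pyGetD (1 :: acc.map (d * ·)) (-1) 0
        = d * PySem.List.pyGetD acc (-1) 0 := by
      simp [PySem.List.pyGetD_neg_one, hacc, List.getLast_cons, List.getLast_map]
    rw [h1]
    have h2 : (1 :: acc.map (d * ·)) ++ [d * PySem.List.pyGetD acc (-1) 0 * g j]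
        = 1 :: (acc ++ [PySem.List.pyGetD acc (-1) 0 * g j]).map (d * ·) := by
      simp [mul_assoc]
    rw [h2, ih _ (by simp)]

theorem pv_plist_snoc (ds : List Int) (d : Int) (hds : ds ≠ []) :
    pvPlist (ds ++ [d]) = 1 :: (pvPlist ds).map (d * ·) := by
  have hm : (0:Int) < (ds.length : Int) := by
    have := List.length_pos_iff.mpr hds; exact_mod_cast this
  unfold pvPlist
  have hlen : (PySem.List.len (ds ++ [d]) - 1) = ((ds.length : Int)) := by
    simp [PySem.List.len_eq]
  rw [hlen, PySem.List.pyRange_neg_one_cons hm]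
  simp only [List.foldl_cons]
  have hstep : ([1] : List Int) ++ [PySem.List.pyGetD [1] (-1) 0 * PySem.List.pyGetD (ds ++ [d]) (ds.length : Int) 0]
      = 1 :: ([1] : List Int).map (d * ·) := by
    simp [PySem.List.pyGetD_natCast, PySem.List.pyGetD_neg_one]
  rw [hstep]
  have hcongr : ∀ i ∈ PySem.List.pyRange ((ds.length : Int) - 1) 0 (-1), ∀ pl : List Int,
      pl ++ [PySem.List.pyGetD pl (-1) 0 * PySem.List.pyGetD (ds ++ [d]) i 0]
        = pl ++ [PySem.List.pyGetD pl (-1) 0 * PySem.List.pyGetD ds i 0] := by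
    intro i hi pl
    rw [PySem.List.mem_pyRange_neg_one] at hi
    have h0 : (0:Int) ≤ i := le_of_lt hi.1
    have hlt : i.toNat < ds.length := by omega
    have heq : PySem.List.pyGetD (ds ++ [d]) i 0 = PySem.List.pyGetD ds i 0 := by
      rw [PySem.List.pyGetD_of_nonneg _ _ h0, PySem.List.pyGetD_of_nonneg _ _ h0,
          List.getD_append _ _ _ _ hlt]
    rw [heq]
  rw [PySem.List.foldl_congr_mem' _
        (fun pl i => pl ++ [PySem.List.pyGetD pl (-1) 0 * PySem.List.pyGetD (ds ++ [d]) i 0])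
        (fun pl i => pl ++ [PySem.List.pyGetD pl (-1) 0 * PySem.List.pyGetD ds i 0]) _ hcongr]
  have hlen2 : (PySem.List.len ds - 1) = ((ds.length : Int) - 1) := by
    simp [PySem.List.len_eq]
  rw [hlen2]
  exact pv_scale (fun i => PySem.List.pyGetD ds i 0)
    (PySem.List.pyRange ((ds.length : Int) - 1) 0 (-1)) [1] d (by simp)

def pvLoopA (dlist : List Int) (idxs : List Int) : Int :=
  ((PySem.List.enumerate (pvPlist dlist).reverse).map
    (fun p => p.2 * PySem.List.pyGetD idxs p.1 0)).sum

def pvLoopB (dlist : List Int) (idxs : List Int) : Int :=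
  (PySem.List.pyRange 0 (PySem.List.len dlist) 1).foldl
    (fun ii i => ii * PySem.List.pyGetD dlist i 0 + PySem.List.pyGetD idxs i 0) 0

theorem pv_plist_len (g : Int → Int) (js : List Int) (acc : List Int) :
    (js.foldl (fun pl i => pl ++ [PySem.List.pyGetD pl (-1) 0 * g i]) acc).length
      = acc.length + js.length := by
  induction js generalizing acc with
  | nil => rfl
  | cons j js ih => simp [List.foldl_cons, ih]; omega

theorem pvPlist_length (ds : List Int) (hds : ds ≠ []) : (pvPlist ds).length = ds.length := by
  have h1 : 1 ≤ ds.length := List.length_pos_iff.mpr hds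
  unfold pvPlist
  rw [pv_plist_len, PySem.List.length_pyRange_neg_one]
  simp [PySem.List.len_eq]
  omega

theorem pv_enum_map (f : Int → Int) (ys : List Int) (s : Int) :
    PySem.List.enumerate (ys.map f) s = (PySem.List.enumerate ys s).map (fun p => (p.1, f p.2)) := by
  induction ys generalizing s with
  | nil => rfl
  | cons y ys ih => simp [PySem.List.enumerate_cons, ih]

theorem pv_loopA_snoc (ds : List Int) (d : Int) (idxs : List Int) (hds : ds ≠ []) :
    pvLoopA (ds ++ [d]) idxs = d * pvLoopA ds idxs + idxs.getD ds.length 0 := by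
  unfold pvLoopA
  rw [pv_plist_snoc ds d hds]
  rw [show (1 :: (pvPlist ds).map (d * ·)).reverse
        = ((pvPlist ds).reverse).map (d * ·) ++ [1] by simp]
  rw [PySem.List.enumerate_append, List.map_append, List.sum_append]
  rw [pv_enum_map]
  rw [List.map_map]
  have h1 : ((PySem.List.enumerate (pvPlist ds).reverse 0).map
      ((fun p => p.2 * PySem.List.pyGetD idxs p.1 0) ∘ (fun p => (p.1, d * p.2)))).sum
      = d * ((PySem.List.enumerate (pvPlist ds).reverse 0).map
          (fun p => p.2 * PySem.List.pyGetD idxs p.1 0)).sum := by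
    have hmc : ((PySem.List.enumerate (pvPlist ds).reverse 0).map
        ((fun p => p.2 * PySem.List.pyGetD idxs p.1 0) ∘ (fun p => (p.1, d * p.2))))
        = (PySem.List.enumerate (pvPlist ds).reverse 0).map
            (fun p => d * (p.2 * PySem.List.pyGetD idxs p.1 0)) := by
      apply List.map_congr_left; intro p _; simp; ring
    rw [hmc]
    exact PySem.List.sum_map_const_mul_int _ d _
  rw [h1]
  have h2 : ((PySem.List.enumerate [1] (0 + ((pvPlist ds).reverse.map (d * ·)).length)).map
      (fun p => p.2 * PySem.List.pyGetD idxs p.1 0)).sum = idxs.getD ds.length 0 := by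
    simp [PySem.List.enumerate_cons, pvPlist_length ds hds, PySem.List.pyGetD_natCast]
  rw [h2]

theorem pv_loopB_snoc (ds : List Int) (d : Int) (idxs : List Int) :
    pvLoopB (ds ++ [d]) idxs = pvLoopB ds idxs * d + idxs.getD ds.length 0 := by
  unfold pvLoopB
  have hlen : PySem.List.len (ds ++ [d]) = ((ds.length : Int)) + 1 := by
    simp [PySem.List.len_eq]
  rw [hlen, PySem.List.pyRange_one_succ_right (by positivity), List.foldl_append]
  have hcongr : ∀ i ∈ PySem.List.pyRange 0 ((ds.length : Int)) 1, ∀ acc : Int,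
      acc * PySem.List.pyGetD (ds ++ [d]) i 0 + PySem.List.pyGetD idxs i 0
        = acc * PySem.List.pyGetD ds i 0 + PySem.List.pyGetD idxs i 0 := by
    intro i hi acc
    rw [PySem.List.mem_pyRange_one] at hi
    have hlt : i.toNat < ds.length := by omega
    rw [PySem.List.pyGetD_of_nonneg _ _ hi.1, PySem.List.pyGetD_of_nonneg _ _ hi.1,
        List.getD_append _ _ _ _ hlt, PySem.List.pyGetD_of_nonneg _ _ hi.1]
  rw [PySem.List.foldl_congr_mem' _
        (fun ii i => ii * PySem.List.pyGetD (ds ++ [d]) i 0 + PySem.List.pyGetD idxs i 0)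
        (fun ii i => ii * PySem.List.pyGetD ds i 0 + PySem.List.pyGetD idxs i 0) _ hcongr]
  have hl2 : PySem.List.len ds = ((ds.length : Int)) := by simp [PySem.List.len_eq]
  rw [hl2]
  simp [PySem.List.pyGetD_natCast]

theorem pv_loopA_nil (idxs : List Int) : pvLoopA [] idxs = PySem.List.pyGetD idxs 0 0 := by
  simp [pvLoopA, pvPlist, PySem.List.len_eq, PySem.List.pyRange_neg_one_eq_nil,
        PySem.List.enumerate_cons, PySem.List.enumerate_nil]

theorem pv_loopB_nil (idxs : List Int) : pvLoopB [] idxs = 0 := by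
  simp [pvLoopB, PySem.List.len_eq, PySem.List.pyRange_one_eq_nil]

theorem pv_loop_base (d : Int) (idxs : List Int) : pvLoopA [d] idxs = pvLoopB [d] idxs := by
  have hA : pvPlist [d] = [1] := by
    simp [pvPlist, PySem.List.len_eq, PySem.List.pyRange_neg_one_eq_nil]
  have hB : PySem.List.pyRange 0 1 1 = [0] := by decide
  simp [pvLoopA, pvLoopB, hA, hB, PySem.List.len_eq, PySem.List.enumerate_cons,
        PySem.List.enumerate_nil, PySem.List.pyGetD_zero]

theorem pv_loop_eq (ds : List Int) : ∀ (d : Int) (idxs : List Int),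
    pvLoopA (ds ++ [d]) idxs = pvLoopB (ds ++ [d]) idxs := by
  induction ds using List.reverseRecOn with
  | nil => intro d idxs; simpa using pv_loop_base d idxs
  | append_singleton ds e ih =>
    intro d idxs
    rw [pv_loopA_snoc (ds ++ [e]) d idxs (by simp), pv_loopB_snoc (ds ++ [e]) d idxs,
        ih e idxs, mul_comm]

theorem pvA_eq (dlist idxs : List Int)
    (h : (idxs.zip dlist).any (fun p => decide (p.2 ≤ p.1)) = false) :
    idxunfold dlist idxs = pvLoopA dlist idxs := by
  simp [idxunfold, pvLoopA, pvPlist, h]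

theorem pvB_eq (dlist idxs : List Int)
    (h : (idxs.zip dlist).any (fun p => decide (p.2 ≤ p.1)) = false) :
    idxunfold_alt dlist idxs = pvLoopB dlist idxs := by
  simp [idxunfold_alt, pvLoopB, h]

theorem pv_guard_false (dlist idxs : List Int) (h : ∀ p ∈ idxs.zip dlist, p.1 < p.2) :
    (idxs.zip dlist).any (fun p => decide (p.2 ≤ p.1)) = false := by
  simp only [List.any_eq_false, decide_eq_true_eq]
  intro p hp; exact not_le.mpr (h p hp)

-- ===== VERDICT =====
theorem idxunfold_spec : Claim_unchanged_idxunfold := by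
  intro dlist idxs _ hpre hnd
  have hg : (idxs.zip dlist).any (fun p => decide (p.2 ≤ p.1)) = false :=
    pv_guard_false _ _ hpre.2.2
  rw [pvA_eq _ _ hg, pvB_eq _ _ hg]
  rcases List.eq_nil_or_concat' dlist with h | ⟨ds, d, rfl⟩
  · subst h
    have hne : idxs ≠ [] := hpre.2.1 rfl
    rw [pv_loopA_nil, pv_loopB_nil]
    cases idxs with
    | nil => exact absurd rfl hne
    | cons x t =>
      have hx : x = 0 := by
        by_contra hx
        exact hnd ⟨rfl, by simp, by simpa using hx⟩
      simp [PySem.List.pyGetD_zero_cons, hx]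
  · exact pv_loop_eq ds d idxs

theorem idxunfold_changed : Claim_changed_idxunfold := by
  unfold Claim_changed_idxunfold; decide

theorem idxunfold_tight : Claim_exact_idxunfold := by
  intro dlist idxs _ hpre hd
  obtain ⟨h1, h2, h3⟩ := hd
  subst h1
  have hg : (idxs.zip ([] : List Int)).any (fun p => decide (p.2 ≤ p.1)) = false := by simp
  rw [pvA_eq _ _ hg, pvB_eq _ _ hg, pv_loopA_nil, pv_loopB_nil]
  cases idxs with
  | nil => exact absurd rfl h2
  | cons x t =>
    have hx : x ≠ 0 := by simpa using h3
    simpa [PySem.List.pyGetD_zero_cons] using hx
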